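-- pv_equiv track=rewrite | github.com/freakkid/Mint | 2017年大数据处理与挖掘（暑期课程）/code/pkg/extract_changed.py | head_and_tails
-- ===== SOURCE A (Python) =====
-- def head_and_tails(word):
--     #第二音节
--     head = ['A','AB','AC','AD','AL','BE','CON','DE','DIS','IM','IN','EM','EN','FOR','PRE',
--     'PRO','TO','TRANS','MIS','RE','TANS','UN']
--     #第二音节
--     tail1 = ['AIM','AIN','CUR', 'EEM', 'DUCE','ERE','FIRM','GN','OIN','OKE','OSE','PT','RCE','SELF','UME']
--     #重音位置和原词重音位置一样
--     tail2 = ['AL','ACY','AGE','ER','OR','FUL','ISM','IST','IVE','IZE','LESS','ISE','LY','NESS','SHIP','ING','RY','TY']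
--     #重音落到末音节
--     tail3 = ['ADE','ETTE','EE','ESE','QUE','AAR','EER','ZEE','ROO']
--     #倒数第二音节
--     tail4 = ['IC','ION','ANA','ESCENT','ESCENCE','I','ICS','SIS','ID','INTREPID','INSIPID']
--     tail5 = ['ABLE','IBLE','ARY','ERY','ORY']
--     result = [0,0,0,0,0,0]  #result array
--
--     for x in head:
--         if len(x) <= len(word):
--             if word[:len(x)] == x:
--                 result[0] = 1
--     for x in tail1:
--         if len(x) <= len(word):
--             if word[-len(x):] == x:
--                 result[1] = 1
--     for x in tail2:
--         if len(x) <= len(word):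
--             if word[-len(x):] == x:
--                 result[2] = 1
--     for x in tail3:
--         if len(x) <= len(word):
--             if word[-len(x):] == x:
--                 result[3] = 1
--     for x in tail4:
--         if len(x) <= len(word):
--             if word[-len(x):] == x:
--                 result[4] = 1
--     for x in tail5:
--         if len(x) <= len(word):
--             if word[-len(x):] == x:
--                 result[5] = 1
--     return result
-- ===== SOURCE B (Python) =====
-- # Affix groups in slot order: group 0 is matched as a prefix, groups 1-5 as suffixes.
-- _AFFIX_GROUPS = (
--     ['A','AB','AC','AD','AL','BE','CON','DE','DIS','IM','IN','EM','EN','FOR','PRE',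
--      'PRO','TO','TRANS','MIS','RE','TANS','UN'],
--     ['AIM','AIN','CUR','EEM','DUCE','ERE','FIRM','GN','OIN','OKE','OSE','PT','RCE','SELF','UME'],
--     ['AL','ACY','AGE','ER','OR','FUL','ISM','IST','IVE','IZE','LESS','ISE','LY','NESS','SHIP','ING','RY','TY'],
--     ['ADE','ETTE','EE','ESE','QUE','AAR','EER','ZEE','ROO'],
--     ['IC','ION','ANA','ESCENT','ESCENCE','I','ICS','SIS','ID','INTREPID','INSIPID'],
--     ['ABLE','IBLE','ARY','ERY','ORY'],
-- )
--
--
-- def head_and_tails(word):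
--     # Precompute, once, every prefix and every suffix of the word up to length 8
--     # (8 = longest affix), then test each group against those pools.
--     m = min(len(word), 8)
--     prefixes = {word[:L] for L in range(1, m + 1)}
--     suffixes = {word[-L:] for L in range(1, m + 1)}
--     flags = []
--     for i, group in enumerate(_AFFIX_GROUPS):
--         pool = prefixes if i == 0 else suffixes
--         flags.append(1 if any(a in pool for a in group) else 0)
--     return flags
-- ===== Notes on version B (the rewrite author's own statement) =====
-- stated objective: alternative
-- what changed: Instead of scanning every affix and comparing it against a fresh slice of the word, B precomputes once the pools of all prefixes and all suffixes of the word up to length 8 (the longest affix) as sets, then produces each flag by a single membership scan of the group against the appropriate pool, assembling the flags by appending in one enumerate loop over the group table instead of mutating a preallocated result array.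
import Mathlib
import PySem

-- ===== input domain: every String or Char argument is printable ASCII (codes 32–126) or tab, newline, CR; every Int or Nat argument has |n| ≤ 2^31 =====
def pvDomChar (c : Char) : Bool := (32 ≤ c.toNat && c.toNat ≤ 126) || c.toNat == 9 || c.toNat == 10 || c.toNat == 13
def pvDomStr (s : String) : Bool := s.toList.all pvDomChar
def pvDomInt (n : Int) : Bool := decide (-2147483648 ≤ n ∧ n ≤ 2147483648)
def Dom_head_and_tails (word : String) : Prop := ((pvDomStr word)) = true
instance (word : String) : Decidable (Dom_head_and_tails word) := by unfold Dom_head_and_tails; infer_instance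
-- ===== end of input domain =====

-- B replaces A's per-affix slice-equality loops by precomputing the pools of all prefixes and
-- all suffixes of the word up to length 8 as sets and testing each affix group against the
-- appropriate pool (objective: alternative).

-- ===== PORT A =====
-- A's six affix groups, as lists of code-point lists
def pvHead : List (List Char) :=
  ["A".toList,"AB".toList,"AC".toList,"AD".toList,"AL".toList,"BE".toList,"CON".toList,"DE".toList,
   "DIS".toList,"IM".toList,"IN".toList,"EM".toList,"EN".toList,"FOR".toList,"PRE".toList,
   "PRO".toList,"TO".toList,"TRANS".toList,"MIS".toList,"RE".toList,"TANS".toList,"UN".toList]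
def pvTail1 : List (List Char) :=
  ["AIM".toList,"AIN".toList,"CUR".toList,"EEM".toList,"DUCE".toList,"ERE".toList,"FIRM".toList,
   "GN".toList,"OIN".toList,"OKE".toList,"OSE".toList,"PT".toList,"RCE".toList,"SELF".toList,"UME".toList]
def pvTail2 : List (List Char) :=
  ["AL".toList,"ACY".toList,"AGE".toList,"ER".toList,"OR".toList,"FUL".toList,"ISM".toList,"IST".toList,
   "IVE".toList,"IZE".toList,"LESS".toList,"ISE".toList,"LY".toList,"NESS".toList,"SHIP".toList,
   "ING".toList,"RY".toList,"TY".toList]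
def pvTail3 : List (List Char) :=
  ["ADE".toList,"ETTE".toList,"EE".toList,"ESE".toList,"QUE".toList,"AAR".toList,"EER".toList,
   "ZEE".toList,"ROO".toList]
def pvTail4 : List (List Char) :=
  ["IC".toList,"ION".toList,"ANA".toList,"ESCENT".toList,"ESCENCE".toList,"I".toList,"ICS".toList,
   "SIS".toList,"ID".toList,"INTREPID".toList,"INSIPID".toList]
def pvTail5 : List (List Char) :=
  ["ABLE".toList,"IBLE".toList,"ARY".toList,"ERY".toList,"ORY".toList]

-- A's loop 'for x in group: if len(x) <= len(word): if word[:len(x)] == x: result[i] = 1'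
def pvLoopPref (w : List Char) (g : List (List Char)) (i : Nat) (res : List Int) : List Int :=
  g.foldl (fun r x =>
    if x.length ≤ w.length then
      if PySem.List.slice w none (some (x.length : Int)) = x then r.set i 1 else r
    else r) res

-- A's loop 'for x in group: if len(x) <= len(word): if word[-len(x):] == x: result[i] = 1'
def pvLoopSuf (w : List Char) (g : List (List Char)) (i : Nat) (res : List Int) : List Int :=
  g.foldl (fun r x =>
    if x.length ≤ w.length then
      if PySem.List.slice w (some (-(x.length : Int))) none = x then r.set i 1 else r
    else r) res

def head_and_tails (word : String) : List Int :=
  pvLoopSuf word.toList pvTail5 5 (pvLoopSuf word.toList pvTail4 4 (pvLoopSuf word.toList pvTail3 3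
    (pvLoopSuf word.toList pvTail2 2 (pvLoopSuf word.toList pvTail1 1
      (pvLoopPref word.toList pvHead 0 [0, 0, 0, 0, 0, 0])))))

-- ===== PORT B =====
-- B's affix table _AFFIX_GROUPS: slot 0 is a prefix group, slots 1-5 are suffix groups
def pvGroupsB : List (List String) :=
  [["A","AB","AC","AD","AL","BE","CON","DE","DIS","IM","IN","EM","EN","FOR","PRE",
    "PRO","TO","TRANS","MIS","RE","TANS","UN"],
   ["AIM","AIN","CUR","EEM","DUCE","ERE","FIRM","GN","OIN","OKE","OSE","PT","RCE","SELF","UME"],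
   ["AL","ACY","AGE","ER","OR","FUL","ISM","IST","IVE","IZE","LESS","ISE","LY","NESS","SHIP","ING","RY","TY"],
   ["ADE","ETTE","EE","ESE","QUE","AAR","EER","ZEE","ROO"],
   ["IC","ION","ANA","ESCENT","ESCENCE","I","ICS","SIS","ID","INTREPID","INSIPID"],
   ["ABLE","IBLE","ARY","ERY","ORY"]]

-- B's '1 if any(a in pool for a in group) else 0'
def pvFlagB (g : List String) (pool : PySem.Set (List Char)) : Int :=
  if g.any (fun a => PySem.Set.contains pool a.toList) then 1 else 0

def head_and_tails_alt (word : String) : List Int :=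
  let w := word.toList
  let m : Int := min (w.length : Int) 8
  let prefixes : PySem.Set (List Char) :=
    PySem.Set.ofList ((PySem.List.pyRange 1 (m + 1) 1).map
      (fun L => PySem.List.slice w none (some L)))
  let suffixes : PySem.Set (List Char) :=
    PySem.Set.ofList ((PySem.List.pyRange 1 (m + 1) 1).map
      (fun L => PySem.List.slice w (some (-L)) none))
  (PySem.List.enumerate pvGroupsB 0).map
    (fun p => pvFlagB p.2 (if p.1 == 0 then prefixes else suffixes))

-- ===== PRECONDITION & SPEC =====
def Spec_head_and_tails (word : String) (out : List Int) : Prop := out = head_and_tails_alt word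
instance (word : String) (out : List Int) : Decidable (Spec_head_and_tails word out) := by unfold Spec_head_and_tails; infer_instance

-- ===== CLAIM (what is proved, stated in full; the proofs are below) =====
def Claim_equal_head_and_tails : Prop := ∀ (word : String), Dom_head_and_tails word → Spec_head_and_tails word (head_and_tails word)

-- ===== LEMMAS AND PROOFS =====

-- a fold that sets slot i to 1 on a hit leaves slot i at 1 exactly when some element hits
theorem foldl_set_one {A : Type} (p : A → Bool) (g : List A) (i : Nat) (res : List Int) :
    g.foldl (fun r x => if p x then r.set i 1 else r) res =
      if g.any p then res.set i 1 else res := by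
  induction g generalizing res with
  | nil => rfl
  | cons x xs ih =>
    simp only [List.foldl_cons, List.any_cons]
    by_cases h : p x = true
    · simp only [h, if_true, Bool.true_or, ih, List.set_set]
      split <;> rfl
    · simp only [h, if_false, Bool.false_or, ih, Bool.false_eq_true]

-- A's loop sets slot i to 1 exactly when some affix of the group matches
theorem pvLoopPref_eq (w : List Char) (g : List (List Char)) (i : Nat) (res : List Int) :
    pvLoopPref w g i res =
      if g.any (fun x => decide (x.length ≤ w.length) &&
          decide (PySem.List.slice w none (some (x.length : Int)) = x))
      then res.set i 1 else res := by
  rw [show pvLoopPref w g i res =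
      g.foldl (fun r x => if (decide (x.length ≤ w.length) &&
        decide (PySem.List.slice w none (some (x.length : Int)) = x)) then r.set i 1 else r) res by
    unfold pvLoopPref
    congr 1
    funext r x
    by_cases h1 : x.length ≤ w.length <;>
      by_cases h2 : PySem.List.slice w none (some (x.length : Int)) = x <;> simp [h1, h2]]
  exact foldl_set_one _ g i res

theorem pvLoopSuf_eq (w : List Char) (g : List (List Char)) (i : Nat) (res : List Int) :
    pvLoopSuf w g i res =
      if g.any (fun x => decide (x.length ≤ w.length) &&
          decide (PySem.List.slice w (some (-(x.length : Int))) none = x))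
      then res.set i 1 else res := by
  rw [show pvLoopSuf w g i res =
      g.foldl (fun r x => if (decide (x.length ≤ w.length) &&
        decide (PySem.List.slice w (some (-(x.length : Int))) none = x)) then r.set i 1 else r) res by
    unfold pvLoopSuf
    congr 1
    funext r x
    by_cases h1 : x.length ≤ w.length <;>
      by_cases h2 : PySem.List.slice w (some (-(x.length : Int))) none = x <;> simp [h1, h2]]
  exact foldl_set_one _ g i res

-- word[:L] has length L when L ≤ len(word) …
theorem pref_len (w : List Char) (L : Nat) (h : L ≤ w.length) :
    (PySem.List.slice w none (some (L : Int))).length = L := by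
  rw [PySem.List.slice_to_natCast]
  simp only [List.length_take]
  omega

-- … and word[-L:] has length L when 0 < L ≤ len(word)
theorem suf_len (w : List Char) (L : Nat) (hp : 0 < L) (h : L ≤ w.length) :
    (PySem.List.slice w (some (-(L : Int))) none).length = L := by
  rw [PySem.List.slice_from_neg_natCast (k := L) (xs := w) hp]
  simp only [List.length_drop]
  omega

-- membership of an affix in B's suffix pool = A's slice-equality test for that affix
theorem pool_suf_mem (w x : List Char) (h1 : 0 < x.length) (h8 : x.length ≤ 8) :
    PySem.Set.contains
      (PySem.Set.ofList ((PySem.List.pyRange 1 (min (w.length : Int) 8 + 1) 1).map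
        (fun L => PySem.List.slice w (some (-L)) none))) x
    = (decide (x.length ≤ w.length) &&
        decide (PySem.List.slice w (some (-(x.length : Int))) none = x)) := by
  rw [Bool.eq_iff_iff]
  simp only [PySem.Set.contains_iff, PySem.Set.mem_ofList, List.mem_map,
    PySem.List.mem_pyRange_one, Bool.and_eq_true, decide_eq_true_eq]
  constructor
  · rintro ⟨L, ⟨hL1, hL2⟩, rfl⟩
    have hk : L = ((L.toNat : Nat) : Int) := by omega
    have hkw : L.toNat ≤ w.length := by omega
    have hkp : 0 < L.toNat := by omega
    have hlen : (PySem.List.slice w (some (-L)) none).length = L.toNat := by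
      rw [hk]; exact suf_len w L.toNat hkp hkw
    refine ⟨by omega, ?_⟩
    rw [hlen, ← hk]
  · rintro ⟨hle, hs⟩
    exact ⟨(x.length : Int), ⟨by omega, by omega⟩, hs⟩

-- membership of an affix in B's prefix pool = A's slice-equality test for that affix
theorem pool_pref_mem (w x : List Char) (h1 : 0 < x.length) (h8 : x.length ≤ 8) :
    PySem.Set.contains
      (PySem.Set.ofList ((PySem.List.pyRange 1 (min (w.length : Int) 8 + 1) 1).map
        (fun L => PySem.List.slice w none (some L)))) x
    = (decide (x.length ≤ w.length) &&
        decide (PySem.List.slice w none (some (x.length : Int)) = x)) := by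
  rw [Bool.eq_iff_iff]
  simp only [PySem.Set.contains_iff, PySem.Set.mem_ofList, List.mem_map,
    PySem.List.mem_pyRange_one, Bool.and_eq_true, decide_eq_true_eq]
  constructor
  · rintro ⟨L, ⟨hL1, hL2⟩, rfl⟩
    have hk : L = ((L.toNat : Nat) : Int) := by omega
    have hkw : L.toNat ≤ w.length := by omega
    have hlen : (PySem.List.slice w none (some L)).length = L.toNat := by
      rw [hk]; exact pref_len w L.toNat hkw
    refine ⟨by omega, ?_⟩
    rw [hlen, ← hk]
  · rintro ⟨hle, hs⟩
    exact ⟨(x.length : Int), ⟨by omega, by omega⟩, hs⟩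

-- pointwise-equal predicates give equal 'any'
theorem any_ext {A : Type} (l : List A) (p q : A → Bool) (h : ∀ x ∈ l, p x = q x) :
    l.any p = l.any q := by
  induction l with
  | nil => rfl
  | cons x xs ih =>
    simp only [List.any_cons, h x (List.mem_cons_self), ih (fun y hy => h y (List.mem_cons_of_mem x hy))]

-- B's group scan against the suffix pool = A's per-affix scan, for groups of affixes of length 1..8
theorem flag_suf (w : List Char) (gS : List String)
    (hb : ∀ a ∈ gS, 0 < a.toList.length ∧ a.toList.length ≤ 8) :
    (gS.any (fun a => PySem.Set.contains
        (PySem.Set.ofList ((PySem.List.pyRange 1 (min (w.length : Int) 8 + 1) 1).map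
          (fun L => PySem.List.slice w (some (-L)) none))) a.toList))
    = (gS.map String.toList).any (fun x => decide (x.length ≤ w.length) &&
        decide (PySem.List.slice w (some (-(x.length : Int))) none = x)) := by
  rw [List.any_map]
  exact any_ext gS _ _ (fun a ha => pool_suf_mem w a.toList (hb a ha).1 (hb a ha).2)

theorem flag_pref (w : List Char) (gS : List String)
    (hb : ∀ a ∈ gS, 0 < a.toList.length ∧ a.toList.length ≤ 8) :
    (gS.any (fun a => PySem.Set.contains
        (PySem.Set.ofList ((PySem.List.pyRange 1 (min (w.length : Int) 8 + 1) 1).map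
          (fun L => PySem.List.slice w none (some L)))) a.toList))
    = (gS.map String.toList).any (fun x => decide (x.length ≤ w.length) &&
        decide (PySem.List.slice w none (some (x.length : Int)) = x)) := by
  rw [List.any_map]
  exact any_ext gS _ _ (fun a ha => pool_pref_mem w a.toList (hb a ha).1 (hb a ha).2)

-- ===== VERDICT (by name: the statement is the Claim_ definition above) =====
theorem head_and_tails_spec : Claim_equal_head_and_tails := by
  intro word _
  show head_and_tails word = head_and_tails_alt word
  unfold head_and_tails head_and_tails_alt pvFlagB
  simp only [pvGroupsB, PySem.List.enumerate, List.map_cons, List.map_nil, beq_iff_eq]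
  norm_num only
  simp only [if_true, if_false]
  rw [pvLoopPref_eq, pvLoopSuf_eq, pvLoopSuf_eq, pvLoopSuf_eq, pvLoopSuf_eq, pvLoopSuf_eq]
  rw [flag_pref word.toList _ (by decide), flag_suf word.toList _ (by decide),
      flag_suf word.toList _ (by decide), flag_suf word.toList _ (by decide),
      flag_suf word.toList _ (by decide), flag_suf word.toList _ (by decide)]
  rw [show (["A","AB","AC","AD","AL","BE","CON","DE","DIS","IM","IN","EM","EN","FOR","PRE",
    "PRO","TO","TRANS","MIS","RE","TANS","UN"] : List String).map String.toList = pvHead from by decide,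
    show (["AIM","AIN","CUR","EEM","DUCE","ERE","FIRM","GN","OIN","OKE","OSE","PT","RCE","SELF","UME"] : List String).map String.toList = pvTail1 from by decide,
    show (["AL","ACY","AGE","ER","OR","FUL","ISM","IST","IVE","IZE","LESS","ISE","LY","NESS","SHIP","ING","RY","TY"] : List String).map String.toList = pvTail2 from by decide,
    show (["ADE","ETTE","EE","ESE","QUE","AAR","EER","ZEE","ROO"] : List String).map String.toList = pvTail3 from by decide,
    show (["IC","ION","ANA","ESCENT","ESCENCE","I","ICS","SIS","ID","INTREPID","INSIPID"] : List String).map String.toList = pvTail4 from by decide,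
    show (["ABLE","IBLE","ARY","ERY","ORY"] : List String).map String.toList = pvTail5 from by decide]
  split_ifs <;> rfl
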